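-- pv_equiv track=rewrite | github.com/Celsogabrielf16/MC102 | lab08/lab08.py | determinaVencedorNaoMereciaEstarAqui
-- ===== SOURCE A (Python) =====
-- def determinaVencedorNaoMereciaEstarAqui(listaFilmesIndicados: list, dicionarioCategorias: dict) -> list[str]:
--     filmesNaoAvaliados: list[str] = []
--     for filme in listaFilmesIndicados:
--         naoFoiAvaliado: bool = True
--         for categoria in dicionarioCategorias.values():
--             if categoria.count(filme) == 1:
--                 naoFoiAvaliado = False
--         if naoFoiAvaliado:
--             filmesNaoAvaliados.append(filme)
--     return filmesNaoAvaliados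
-- ===== SOURCE B (Python) =====
-- def determinaVencedorNaoMereciaEstarAqui(listaFilmesIndicados: list, dicionarioCategorias: dict) -> list[str]:
--     # Index all categories once: a film is "evaluated" iff it occurs exactly once in some category.
--     filmesAvaliados = set()
--     for categoria in dicionarioCategorias.values():
--         contagem = {}
--         for filme in categoria:
--             contagem[filme] = contagem.get(filme, 0) + 1
--         for filme, vezes in contagem.items():
--             if vezes == 1:
--                 filmesAvaliados.add(filme)
--     return [filme for filme in listaFilmesIndicados if filme not in filmesAvaliados]
-- ===== Notes on version B (the rewrite author's own statement) =====
-- stated objective: faster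
-- what changed: Inverts A's per-film scan over all categories into a single indexing pass: one counting pass per category builds the set of films evaluated somewhere (count==1), then one membership-filtered pass over the indicated list.
import Mathlib
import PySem

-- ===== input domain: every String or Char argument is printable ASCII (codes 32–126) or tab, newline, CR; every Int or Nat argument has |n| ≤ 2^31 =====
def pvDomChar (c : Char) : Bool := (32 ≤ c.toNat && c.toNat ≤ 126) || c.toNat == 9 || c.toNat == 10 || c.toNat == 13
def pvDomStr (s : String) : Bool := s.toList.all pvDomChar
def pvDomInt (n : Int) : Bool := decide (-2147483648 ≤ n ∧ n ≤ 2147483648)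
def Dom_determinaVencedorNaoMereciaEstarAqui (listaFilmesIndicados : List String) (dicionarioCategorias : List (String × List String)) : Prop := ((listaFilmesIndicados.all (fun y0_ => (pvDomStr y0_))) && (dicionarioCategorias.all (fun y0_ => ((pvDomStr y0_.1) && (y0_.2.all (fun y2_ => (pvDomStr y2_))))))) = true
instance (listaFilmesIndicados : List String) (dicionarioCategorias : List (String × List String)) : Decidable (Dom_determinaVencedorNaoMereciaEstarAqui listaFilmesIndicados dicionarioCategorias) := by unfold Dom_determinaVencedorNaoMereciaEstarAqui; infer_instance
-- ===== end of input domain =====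

-- B replaces A's per-film rescan of every category by one counting pass per category
-- building the set of evaluated films (count == 1), then a single membership filter.

-- ===== PORT A =====
def determinaVencedorNaoMereciaEstarAqui (listaFilmesIndicados : List String) (dicionarioCategorias : List (String × List String)) : List String :=
  listaFilmesIndicados.foldl
    (fun filmesNaoAvaliados filme =>
      let naoFoiAvaliado :=
        (PySem.Dict.ofList dicionarioCategorias).values.foldl
          (fun b categoria => if categoria.count filme == 1 then false else b) true
      if naoFoiAvaliado then filmesNaoAvaliados ++ [filme] else filmesNaoAvaliados)
    []

-- ===== PORT B =====
def determinaVencedorNaoMereciaEstarAqui_alt (listaFilmesIndicados : List String) (dicionarioCategorias : List (String × List String)) : List String :=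
  let filmesAvaliados : PySem.Set String :=
    (PySem.Dict.ofList dicionarioCategorias).values.foldl
      (fun s categoria =>
        let contagem :=
          categoria.foldl (fun c filme => c.insert filme (c.getD filme 0 + 1)) (PySem.Dict.empty : PySem.Dict String Int)
        contagem.items.foldl (fun s p => if p.2 == 1 then PySem.Set.add s p.1 else s) s)
      PySem.Set.empty
  listaFilmesIndicados.filter (fun filme => !(PySem.Set.contains filmesAvaliados filme))

-- ===== PRECONDITION & SPEC =====
def Spec_determinaVencedorNaoMereciaEstarAqui (listaFilmesIndicados : List String) (dicionarioCategorias : List (String × List String)) (out : List String) : Prop := out = determinaVencedorNaoMereciaEstarAqui_alt listaFilmesIndicados dicionarioCategorias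
instance (listaFilmesIndicados : List String) (dicionarioCategorias : List (String × List String)) (out : List String) : Decidable (Spec_determinaVencedorNaoMereciaEstarAqui listaFilmesIndicados dicionarioCategorias out) := by unfold Spec_determinaVencedorNaoMereciaEstarAqui; infer_instance

-- ===== CLAIM (what is proved, stated in full; the proofs are below) =====
def Claim_equal_determinaVencedorNaoMereciaEstarAqui : Prop := ∀ (listaFilmesIndicados : List String) (dicionarioCategorias : List (String × List String)), Dom_determinaVencedorNaoMereciaEstarAqui listaFilmesIndicados dicionarioCategorias → Spec_determinaVencedorNaoMereciaEstarAqui listaFilmesIndicados dicionarioCategorias (determinaVencedorNaoMereciaEstarAqui listaFilmesIndicados dicionarioCategorias)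

-- ===== LEMMAS AND PROOFS =====

-- A's inner loop computes "no category counts filme exactly once".
lemma aInner_eq_all (vals : List (List String)) (filme : String) (b : Bool) :
    vals.foldl (fun b categoria => if categoria.count filme == 1 then false else b) b
      = (b && vals.all (fun categoria => !(categoria.count filme == 1))) := by
  induction vals generalizing b with
  | nil => simp
  | cons c cs ih =>
    simp only [List.foldl_cons, List.all_cons, ih]
    by_cases h : c.count filme == 1 <;> simp [h]

-- Membership in B's accumulated set.
lemma mem_bSet (vals : List (List String)) (s : PySem.Set String) (x : String) :
    x ∈ vals.foldl
        (fun s categoria =>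
          let contagem :=
            categoria.foldl (fun c filme => c.insert filme (c.getD filme 0 + 1)) (PySem.Dict.empty : PySem.Dict String Int)
          contagem.items.foldl (fun s p => if p.2 == 1 then PySem.Set.add s p.1 else s) s) s
      ↔ x ∈ s ∨ ∃ cat ∈ vals, cat.count x = 1 := by
  induction vals generalizing s with
  | nil => simp
  | cons c cs ih =>
    rw [List.foldl_cons]
    show x ∈ List.foldl _ (_ : PySem.Set String) cs ↔ _
    rw [ih]
    simp only [PySem.Dict.foldl_insert_getD_add_one_eq_counter,
      PySem.List.foldl_if_eq_foldl_filter, PySem.Set.mem_foldl_add, PySem.Dict.items_counter,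
      List.mem_filter, List.mem_map, List.mem_cons]
    constructor
    · rintro ((h | ⟨p, ⟨⟨k, hk, rfl⟩, h1⟩, rfl⟩) | ⟨cat, hcat, hc⟩)
      · exact Or.inl h
      · exact Or.inr ⟨c, Or.inl rfl, by simpa using h1⟩
      · exact Or.inr ⟨cat, Or.inr hcat, hc⟩
    · rintro (h | ⟨cat, rfl | hcat, hc⟩)
      · exact Or.inl (Or.inl h)
      · refine Or.inl (Or.inr ⟨(x, (cat.count x : Int)), ⟨⟨x, ?_, rfl⟩, by simp [hc]⟩, rfl⟩)
        exact (PySem.Set.mem_ofList _ _).mpr (List.count_pos_iff.mp (by omega))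
      · exact Or.inr ⟨cat, hcat, hc⟩

-- The two per-film tests agree: "no category counts x exactly once" = "x not in B's set".
lemma all_eq_not_contains (vals : List (List String)) (x : String) :
    vals.all (fun c => !(c.count x == 1))
      = !(PySem.Set.contains
          (vals.foldl
            (fun s categoria =>
              let contagem :=
                categoria.foldl (fun c filme => c.insert filme (c.getD filme 0 + 1)) (PySem.Dict.empty : PySem.Dict String Int)
              contagem.items.foldl (fun s p => if p.2 == 1 then PySem.Set.add s p.1 else s) s)
            PySem.Set.empty) x) := by
  have hm := mem_bSet vals PySem.Set.empty x
  by_cases h : ∃ cat ∈ vals, cat.count x = 1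
  · have hx := hm.mpr (Or.inr h)
    rcases h with ⟨cat, hcat, hc⟩
    have h1 : vals.all (fun c => !(c.count x == 1)) = false := by
      simp only [List.all_eq_false]
      exact ⟨cat, hcat, by simp [hc]⟩
    have h2 := (PySem.Set.contains_iff _ _).mpr hx
    rw [h1, h2]
    rfl
  · have hx : x ∉ _ := fun hx' => h ((hm.mp hx').resolve_left (by simp [PySem.Set.empty]))
    have h1 : vals.all (fun c => !(c.count x == 1)) = true := by
      simp only [List.all_eq_true, Bool.not_eq_true', beq_eq_false_iff_ne, ne_eq]
      exact fun c hcm he => h ⟨c, hcm, he⟩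
    rw [h1, eq_comm, Bool.not_eq_true', Bool.eq_false_iff, Ne, PySem.Set.contains_iff]
    exact hx

-- ===== VERDICT (by name: the statement is the Claim_ definition above) =====
theorem determinaVencedorNaoMereciaEstarAqui_spec : Claim_equal_determinaVencedorNaoMereciaEstarAqui := by
  intro l d _
  unfold Spec_determinaVencedorNaoMereciaEstarAqui
  unfold determinaVencedorNaoMereciaEstarAqui determinaVencedorNaoMereciaEstarAqui_alt
  simp only [PySem.List.foldl_append_if_eq_filter, List.nil_append]
  apply List.filter_congr
  intro x _
  rw [aInner_eq_all, Bool.true_and, all_eq_not_contains]
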